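-- pv_equiv track=rewrite | github.com/riflosnake/RegexFinder | regexfinder/main.py | __separateGroupsByOrder
-- ===== SOURCE A (Python) =====
-- def __separateGroupsByOrder(lst):
--     grouped = []
--     result = []
--     for i in range(len(lst)):
--         result.append(lst[i])
--         if i == len(lst) - 1:
--             grouped.append(result)
--         if (i != len(lst) - 1) and (lst[i][4:] != str(int(lst[i + 1][4:]) - 1)):
--             grouped.append(result)
--             result = []
--     return grouped
-- ===== SOURCE B (Python) =====
-- def __separateGroupsByOrder(lst):
--     if not lst:
--         return []
--     n = len(lst)
--     cuts = [0] + [i for i in range(1, n) if lst[i - 1][4:] != str(int(lst[i][4:]) - 1)] + [n]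
--     return [lst[a:b] for a, b in zip(cuts, cuts[1:])]
-- ===== Notes on version B (the rewrite author's own statement) =====
-- stated objective: alternative
-- what changed: Replaces A's single stateful pass with a buffer and look-ahead by a staged computation: first a comprehension collecting the cut indices where the suffix chain breaks, then each group materialized as one slice lst[a:b] over consecutive cut pairs.
import Mathlib
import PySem

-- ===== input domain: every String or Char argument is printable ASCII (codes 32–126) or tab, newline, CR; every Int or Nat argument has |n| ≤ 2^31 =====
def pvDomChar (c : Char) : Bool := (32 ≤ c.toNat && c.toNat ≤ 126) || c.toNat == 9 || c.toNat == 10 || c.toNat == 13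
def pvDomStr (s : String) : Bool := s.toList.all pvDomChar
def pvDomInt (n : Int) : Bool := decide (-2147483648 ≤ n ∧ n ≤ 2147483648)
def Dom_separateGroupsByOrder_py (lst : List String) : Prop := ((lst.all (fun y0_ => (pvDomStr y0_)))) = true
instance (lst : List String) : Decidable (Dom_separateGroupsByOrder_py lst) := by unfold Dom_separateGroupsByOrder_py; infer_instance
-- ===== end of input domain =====

-- B is a staged alternative: it first computes the list of cut indices (positions where the
-- suffix chain breaks), then materializes every group as one slice lst[a:b]; same O(n) cost.

-- the break test shared verbatim by both sources: prev[4:] != str(int(cur[4:]) - 1);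
-- the `none` branch is where Python's int() raises ValueError (excluded by Pre_)
def pvBrk (prev cur : String) : Bool :=
  match PySem.Int.ofStr? (PySem.Str.slice cur (some 4) none) with
  | some v => PySem.Str.slice prev (some 4) none != PySem.Int.toStr (v - 1)
  | none => true

-- ===== PORT A =====
-- loop body of A's `for i in range(len(lst))`
def pvStepA (lst : List String) (n : Int) (st : List (List String) × List String) (i : Int) :
    List (List String) × List String :=
  let result := st.2 ++ [PySem.List.pyGetD lst i ""]
  let grouped := if i == n - 1 then st.1 ++ [result] else st.1
  if i != n - 1 && pvBrk (PySem.List.pyGetD lst i "") (PySem.List.pyGetD lst (i + 1) "") then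
    (grouped ++ [result], ([] : List String))
  else
    (grouped, result)

def separateGroupsByOrder_py (lst : List String) : List (List String) :=
  (List.foldl (pvStepA lst (lst.length : Int)) ([], [])
    (PySem.List.pyRange 0 (lst.length : Int) 1)).1

-- ===== PORT B =====
-- the comprehension filter `lst[i-1][4:] != str(int(lst[i][4:]) - 1)` at index i
def pvBrkAt (lst : List String) (i : Int) : Bool :=
  pvBrk (PySem.List.pyGetD lst (i - 1) "") (PySem.List.pyGetD lst i "")

def separateGroupsByOrder_py_alt (lst : List String) : List (List String) :=
  match lst with
  | [] => []
  | _ :: _ =>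
    let n : Int := (lst.length : Int)
    let cuts : List Int :=
      0 :: ((PySem.List.pyRange 1 n 1).filter (fun i => pvBrkAt lst i) ++ [n])
    (cuts.zip cuts.tail).map (fun ab => PySem.List.slice lst (some ab.1) (some ab.2))

-- ===== PRECONDITION & SPEC =====
-- A calls int(lst[i+1][4:]) for every i < len-1: it raises ValueError exactly when some
-- element after the first has a suffix int() cannot parse; those inputs are excluded.
def Pre_separateGroupsByOrder_py (lst : List String) : Prop :=
  ∀ s ∈ lst.tail, (PySem.Int.ofStr? (PySem.Str.slice s (some 4) none)).isSome = true
instance (lst : List String) : Decidable (Pre_separateGroupsByOrder_py lst) := by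
  unfold Pre_separateGroupsByOrder_py; infer_instance

def pvWitness_separateGroupsByOrder_py : List String := ["abcd1", "abcd2", "abcd7"]

def Spec_separateGroupsByOrder_py (lst : List String) (out : List (List String)) : Prop :=
  out = separateGroupsByOrder_py_alt lst
instance (lst : List String) (out : List (List String)) :
    Decidable (Spec_separateGroupsByOrder_py lst out) := by
  unfold Spec_separateGroupsByOrder_py; infer_instance

-- ===== CLAIM (what is proved, stated in full; the proofs are below) =====
def Claim_equal_separateGroupsByOrder_py : Prop :=
  ∀ (lst : List String), Dom_separateGroupsByOrder_py lst →
    Pre_separateGroupsByOrder_py lst →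
    Spec_separateGroupsByOrder_py lst (separateGroupsByOrder_py lst)

-- ===== LEMMAS AND PROOFS =====

-- the common characterization: from element x with remaining elements xs,
-- (continuation of the current group, fully formed later groups)
def pvGrp : String → List String → List String × List (List String)
  | _, [] => ([], [])
  | x, y :: ys =>
    let r := pvGrp y ys
    if pvBrk x y then ([], (y :: r.1) :: r.2) else (y :: r.1, r.2)

-- consecutive-pair slices, the shape of B's final comprehension
def pvPS (L : List String) (cs : List Int) : List (List String) :=
  (cs.zip cs.tail).map (fun ab => PySem.List.slice L (some ab.1) (some ab.2))

lemma pvGetMid (pre : List String) (x : String) (xs : List String) :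
    (pre ++ x :: xs).getD pre.length "" = x := by
  simp [List.getD_eq_getElem?_getD]

lemma pvPS_cons (L : List String) (a b : Int) (t : List Int) :
    pvPS L (a :: b :: t) = PySem.List.slice L (some a) (some b) :: pvPS L (b :: t) := rfl

lemma pvSliceCons (pre : List String) (x : String) (xs : List String) (b : Int)
    (hb : (pre.length : Int) + 1 ≤ b) :
    PySem.List.slice (pre ++ x :: xs) (some (pre.length : Int)) (some b)
      = x :: PySem.List.slice (pre ++ x :: xs) (some ((pre.length : Int) + 1)) (some b) := by
  rw [PySem.List.slice_toNat _ (by positivity) (by omega),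
      PySem.List.slice_toNat _ (by omega) (by omega)]
  have h1 : (pre ++ x :: xs).drop ((pre.length : Int)).toNat = x :: xs := by
    simp
  have h2 : ((pre.length : Int) + 1).toNat = ((pre.length : Int)).toNat + 1 := by omega
  rw [h1, h2]
  have h3 : (pre ++ x :: xs).drop (((pre.length : Int)).toNat + 1) = xs := by
    rw [show ((pre.length : Int)).toNat + 1 = (pre ++ [x]).length by simp,
        show pre ++ x :: xs = (pre ++ [x]) ++ xs by simp, List.drop_left]
  rw [h3]
  have h4 : b.toNat - ((pre.length : Int)).toNat = (b.toNat - (((pre.length : Int)).toNat + 1)) + 1 := by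
    omega
  rw [h4, List.take_succ_cons]

lemma pvB_inv (xs : List String) :
    ∀ (pre : List String) (x : String),
      pvPS (pre ++ x :: xs)
        ((pre.length : Int) ::
          ((PySem.List.pyRange ((pre.length : Int) + 1) (((pre ++ x :: xs).length : Nat) : Int) 1).filter
              (fun i => pvBrkAt (pre ++ x :: xs) i)
            ++ [(((pre ++ x :: xs).length : Nat) : Int)]))
      = (x :: (pvGrp x xs).1) :: (pvGrp x xs).2 := by
  induction xs with
  | nil =>
    intro pre x
    have hn : (((pre ++ x :: []).length : Nat) : Int) = (pre.length : Int) + 1 := by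
      simp only [List.length_append, List.length_cons, List.length_nil]; push_cast; ring
    rw [hn]
    have hr : PySem.List.pyRange ((pre.length : Int) + 1) ((pre.length : Int) + 1) 1 = [] := by
      simp [pysem]
    rw [hr]
    simp only [List.filter_nil, List.nil_append]
    rw [pvPS_cons]
    have : PySem.List.slice (pre ++ x :: []) (some (pre.length : Int))
        (some ((pre.length : Int) + 1))
        = x :: PySem.List.slice (pre ++ x :: []) (some ((pre.length : Int) + 1))
            (some ((pre.length : Int) + 1)) := pvSliceCons pre x [] _ (by omega)
    rw [this]
    have hsl : PySem.List.slice (pre ++ x :: []) (some ((pre.length : Int) + 1))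
        (some ((pre.length : Int) + 1)) = [] := by
      rw [PySem.List.slice_toNat _ (by omega) (by omega)]; simp
    rw [hsl]
    simp [pvPS, pvGrp]
  | cons y ys ih =>
    intro pre x
    have hlen : (((pre ++ x :: y :: ys).length : Nat) : Int)
        = (pre.length : Int) + 2 + (ys.length : Int) := by
      simp only [List.length_append, List.length_cons]; push_cast; ring
    have hx : PySem.List.pyGetD (pre ++ x :: y :: ys) (pre.length : Int) "" = x := by
      rw [PySem.List.pyGetD_natCast, pvGetMid]
    have hy : PySem.List.pyGetD (pre ++ x :: y :: ys) ((pre.length : Int) + 1) "" = y := by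
      have h1 : ((pre.length : Int) + 1) = (((pre ++ [x]).length : Nat) : Int) := by
        simp only [List.length_append, List.length_cons, List.length_nil]; push_cast; ring
      have h2 : pre ++ x :: y :: ys = (pre ++ [x]) ++ y :: ys := by simp
      rw [h1, h2, PySem.List.pyGetD_natCast, pvGetMid]
    have hbrkat : pvBrkAt (pre ++ x :: y :: ys) ((pre.length : Int) + 1) = pvBrk x y := by
      unfold pvBrkAt
      rw [show (pre.length : Int) + 1 - 1 = (pre.length : Int) by ring, hx, hy]
    rw [PySem.List.pyRange_one_cons (by rw [hlen]; omega), List.filter_cons]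
    have hih := ih (pre ++ [x]) y
    have hpre' : (((pre ++ [x]).length : Nat) : Int) = (pre.length : Int) + 1 := by
      simp only [List.length_append, List.length_cons, List.length_nil]; push_cast; ring
    have hL' : (pre ++ [x]) ++ y :: ys = pre ++ x :: y :: ys := by simp
    rw [hpre', hL'] at hih
    by_cases h : pvBrk x y = true
    · rw [hbrkat, if_pos h, List.cons_append]
      rw [pvPS_cons]
      rw [pvSliceCons pre x (y :: ys) _ (by omega)]
      have hsl : PySem.List.slice (pre ++ x :: y :: ys) (some ((pre.length : Int) + 1))
          (some ((pre.length : Int) + 1)) = [] := by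
        rw [PySem.List.slice_toNat _ (by omega) (by omega)]; simp
      rw [hsl, hih]
      simp [pvGrp, h]
    · rw [hbrkat, if_neg (by simp [h])]
      have h12 : (pre.length : Int) + 1 + 1 = (pre.length : Int) + 2 := by ring
      rw [h12] at hih ⊢
      -- the remaining cut list is nonempty and its head c satisfies pre.length + 2 ≤ c
      set rest := (PySem.List.pyRange ((pre.length : Int) + 2) (((pre ++ x :: y :: ys).length : Nat) : Int) 1).filter
          (fun i => pvBrkAt (pre ++ x :: y :: ys) i)
        ++ [(((pre ++ x :: y :: ys).length : Nat) : Int)] with hrest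
      obtain ⟨c, t, hct⟩ : ∃ c t, rest = c :: t := by
        cases hr : rest with
        | nil => exact absurd hr (by simp [hrest])
        | cons c t => exact ⟨c, t, rfl⟩
      have hc : (pre.length : Int) + 2 ≤ c := by
        have : c ∈ rest := by rw [hct]; exact List.mem_cons_self
        rw [hrest] at this
        rcases List.mem_append.mp this with hm | hm
        · have := (PySem.List.mem_pyRange_one).mp (List.mem_of_mem_filter hm)
          omega
        · simp at hm; omega
      rw [hct] at hih ⊢
      rw [pvPS_cons] at hih ⊢
      rw [pvSliceCons pre x (y :: ys) c (by omega)]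
      obtain ⟨hh, ht⟩ := List.cons_eq_cons.mp hih
      rw [hh, ht]
      simp [pvGrp, h]

lemma pvA_inv (xs : List String) :
    ∀ (pre : List String) (x : String) (grouped : List (List String)) (result : List String),
      (List.foldl (pvStepA (pre ++ x :: xs) ((pre ++ x :: xs).length : Int)) (grouped, result)
        (PySem.List.pyRange (pre.length : Int) ((pre ++ x :: xs).length : Int) 1)).1
      = grouped ++ ((result ++ [x]) ++ (pvGrp x xs).1) :: (pvGrp x xs).2 := by
  induction xs with
  | nil =>
    intro pre x grouped result
    rw [PySem.List.pyRange_one_cons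
      (by simp only [List.length_append, List.length_cons, List.length_nil]; push_cast; omega)]
    have hnil : PySem.List.pyRange ((pre.length : Int) + 1) ((pre ++ x :: []).length : Int) 1 = [] := by
      have : ((pre ++ x :: []).length : Int) = (pre.length : Int) + 1 := by
        simp only [List.length_append, List.length_cons, List.length_nil]; push_cast; ring
      rw [this]; simp [pysem]
    rw [hnil]
    simp [pvStepA, pvGrp, PySem.List.pyGetD_natCast]
  | cons y ys ih =>
    intro pre x grouped result
    rw [PySem.List.pyRange_one_cons
      (by simp only [List.length_append, List.length_cons]; push_cast; omega)]
    have hne : ((pre.length : Int) == ((pre ++ x :: y :: ys).length : Int) - 1) = false := by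
      simp only [beq_eq_false_iff_ne, ne_eq, List.length_append, List.length_cons]
      push_cast; omega
    have hb : ((pre.length : Int) != ((pre ++ x :: y :: ys).length : Int) - 1) = true := by
      rw [bne, hne]; rfl
    have hx : PySem.List.pyGetD (pre ++ x :: y :: ys) (pre.length : Int) "" = x := by
      rw [PySem.List.pyGetD_natCast, pvGetMid]
    have hy : PySem.List.pyGetD (pre ++ x :: y :: ys) ((pre.length : Int) + 1) "" = y := by
      have h1 : ((pre.length : Int) + 1) = (((pre ++ [x]).length : Nat) : Int) := by
        simp only [List.length_append, List.length_cons, List.length_nil]; push_cast; ring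
      have h2 : pre ++ x :: y :: ys = (pre ++ [x]) ++ y :: ys := by simp
      rw [h1, h2, PySem.List.pyGetD_natCast, pvGetMid]
    have hstart : (pre.length : Int) + 1 = (((pre ++ [x]).length : Nat) : Int) := by
      simp only [List.length_append, List.length_cons, List.length_nil]; push_cast; ring
    have hfold : ∀ st : List (List String) × List String,
        (List.foldl (pvStepA (pre ++ x :: y :: ys) ((pre ++ x :: y :: ys).length : Int)) st
          (PySem.List.pyRange ((pre.length : Int) + 1) ((pre ++ x :: y :: ys).length : Int) 1)).1
        = st.1 ++ ((st.2 ++ [y]) ++ (pvGrp y ys).1) :: (pvGrp y ys).2 := by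
      intro st
      have h2 : pre ++ x :: y :: ys = (pre ++ [x]) ++ y :: ys := by simp
      rw [hstart, h2]
      exact ih (pre ++ [x]) y st.1 st.2
    rw [List.foldl_cons]
    by_cases h : pvBrk x y = true
    · have hstep : pvStepA (pre ++ x :: y :: ys) ((pre ++ x :: y :: ys).length : Int)
          (grouped, result) (pre.length : Int) = (grouped ++ [result ++ [x]], []) := by
        simp only [pvStepA, hne, hb, hx, hy, h, Bool.true_and]
        simp
      rw [hstep, hfold]
      simp [pvGrp, h]
    · rw [Bool.not_eq_true] at h
      have hstep : pvStepA (pre ++ x :: y :: ys) ((pre ++ x :: y :: ys).length : Int)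
          (grouped, result) (pre.length : Int) = (grouped, result ++ [x]) := by
        simp only [pvStepA, hne, hb, hx, hy, h, Bool.and_false]
        simp
      rw [hstep, hfold]
      simp [pvGrp, h]

-- ===== VERDICT (by name: the statement is the Claim_ definition above) =====
theorem separateGroupsByOrder_py_spec : Claim_equal_separateGroupsByOrder_py := by
  intro lst _ _
  unfold Spec_separateGroupsByOrder_py
  cases lst with
  | nil => decide
  | cons x xs =>
    have hA' : separateGroupsByOrder_py (x :: xs)
        = ([x] ++ (pvGrp x xs).1) :: (pvGrp x xs).2 := by
      unfold separateGroupsByOrder_py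
      have hA := pvA_inv xs [] x [] []
      simp only [List.nil_append, List.length_nil, Nat.cast_zero] at hA
      rw [hA]
    have hB' : separateGroupsByOrder_py_alt (x :: xs)
        = (x :: (pvGrp x xs).1) :: (pvGrp x xs).2 := by
      have hB := pvB_inv xs [] x
      simp only [List.nil_append, List.length_nil, Nat.cast_zero, Int.zero_add] at hB
      unfold separateGroupsByOrder_py_alt
      exact hB
    rw [hA', hB']
    simp
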